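-- pv_equiv track=rewrite | github.com/RishaanvB/betsy-webshop_deploy | main.py | check_tags_in_list
-- ===== SOURCE A (Python) =====
-- def check_tags_in_list(tag_list, part_of_tag_list):
--     """
--     Sorts both lists alphabetically, then compares items in each list
--     and returns a string with the index of the identical items found in the first list
--     in the form of 'tags-index'. Used for enabling checked attribute in update_product_page.html
--     """
--     duplicated_items = []
--     tag_list = sorted(tag_list)
--     part_of_tag_list = sorted(part_of_tag_list)
--     for index, tag in enumerate(tag_list):
--         if tag in part_of_tag_list:
--             duplicated_items.append(f"update-product-tags-{index}")
--     return duplicated_items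
-- ===== SOURCE B (Python) =====
-- def check_tags_in_list(tag_list, part_of_tag_list):
--     a = sorted(tag_list)
--     b = sorted(part_of_tag_list)
--     result = []
--     i = 0
--     j = 0
--     while i < len(a) and j < len(b):
--         if a[i] == b[j]:
--             result.append(f"update-product-tags-{i}")
--             i += 1
--         elif a[i] < b[j]:
--             i += 1
--         else:
--             j += 1
--     return result
-- ===== Notes on version B (the rewrite author's own statement) =====
-- stated objective: faster
-- what changed: Replaces the per-element membership scan of the second sorted list by a single two-pointer merge over the two sorted lists (advancing only i on a match so duplicates behave like A's membership test).
import Mathlib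
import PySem

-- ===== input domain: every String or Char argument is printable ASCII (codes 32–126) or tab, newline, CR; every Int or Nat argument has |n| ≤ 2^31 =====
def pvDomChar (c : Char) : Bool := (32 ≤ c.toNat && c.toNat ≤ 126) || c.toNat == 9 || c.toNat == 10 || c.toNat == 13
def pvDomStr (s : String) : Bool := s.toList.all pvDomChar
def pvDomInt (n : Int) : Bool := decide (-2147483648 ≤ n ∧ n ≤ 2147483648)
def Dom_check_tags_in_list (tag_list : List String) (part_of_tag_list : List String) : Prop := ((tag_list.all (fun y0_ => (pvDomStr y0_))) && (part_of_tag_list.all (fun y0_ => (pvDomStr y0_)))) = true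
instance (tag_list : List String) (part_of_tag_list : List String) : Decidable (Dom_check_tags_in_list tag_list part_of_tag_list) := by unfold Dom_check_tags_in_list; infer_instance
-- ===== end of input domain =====

-- B replaces the per-element membership scan by one two-pointer merge over the two sorted lists (faster).
-- ===== PORT A =====
def check_tags_in_list (tag_list : List String) (part_of_tag_list : List String) : List String :=
  let tl := PySem.List.sorted tag_list (fun x => x) false
  let pl := PySem.List.sorted part_of_tag_list (fun x => x) false
  (PySem.List.enumerate tl 0).foldl
    (fun acc it =>
      if pl.contains it.2 then acc ++ ["update-product-tags-" ++ PySem.Int.toStr it.1] else acc) []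

-- ===== PORT B =====
-- two-pointer merge over the two sorted lists; i is the index into the sorted tag list
def ctMerge (i : Int) (a : List String) (b : List String) : List String :=
  match a, b with
  | [], _ => []
  | _ :: _, [] => []
  | x :: xs, y :: ys =>
    if x == y then ("update-product-tags-" ++ PySem.Int.toStr i) :: ctMerge (i + 1) xs (y :: ys)
    else if x < y then ctMerge (i + 1) xs (y :: ys)
    else ctMerge i (x :: xs) ys
termination_by a.length + b.length
decreasing_by all_goals simp

def check_tags_in_list_alt (tag_list : List String) (part_of_tag_list : List String) : List String :=
  ctMerge 0 (PySem.List.sorted tag_list (fun x => x) false) (PySem.List.sorted part_of_tag_list (fun x => x) false)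

-- ===== PRECONDITION & SPEC =====
def Spec_check_tags_in_list (tag_list : List String) (part_of_tag_list : List String) (out : List String) : Prop := out = check_tags_in_list_alt tag_list part_of_tag_list
instance (tag_list : List String) (part_of_tag_list : List String) (out : List String) : Decidable (Spec_check_tags_in_list tag_list part_of_tag_list out) := by unfold Spec_check_tags_in_list; infer_instance

-- ===== CLAIM (what is proved, stated in full; the proofs are below) =====
def Claim_equal_check_tags_in_list : Prop := ∀ (tag_list : List String) (part_of_tag_list : List String), Dom_check_tags_in_list tag_list part_of_tag_list → Spec_check_tags_in_list tag_list part_of_tag_list (check_tags_in_list tag_list part_of_tag_list)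

-- ===== LEMMAS AND PROOFS =====
-- reference form of A's loop: walk the sorted tag list with an index, testing membership
def ctRef (i : Int) (p : List String) : List String → List String
  | [] => []
  | x :: xs =>
    if p.contains x then ("update-product-tags-" ++ PySem.Int.toStr i) :: ctRef (i + 1) p xs
    else ctRef (i + 1) p xs

theorem ctRef_nil (i : Int) (l : List String) : ctRef i [] l = [] := by
  induction l generalizing i with
  | nil => rfl
  | cons x xs ih => simp [ctRef, ih]

theorem ctRef_cons_irrel (i : Int) (y : String) (ys l : List String)
    (h : ∀ z ∈ l, z ≠ y) : ctRef i (y :: ys) l = ctRef i ys l := by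
  induction l generalizing i with
  | nil => rfl
  | cons x xs ih =>
    have hx : x ≠ y := h x (by simp)
    simp only [ctRef, List.contains_cons]
    have : (x == y) = false := by simp [hx]
    rw [this]
    simp only [Bool.false_or]
    split
    · rw [ih _ (fun z hz => h z (by simp [hz]))]
    · rw [ih _ (fun z hz => h z (by simp [hz]))]

theorem foldA_eq_ctRef (p t : List String) (i : Int) (acc : List String) :
    (PySem.List.enumerate t i).foldl
      (fun acc it =>
        if p.contains it.2 then acc ++ ["update-product-tags-" ++ PySem.Int.toStr it.1] else acc) acc
      = acc ++ ctRef i p t := by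
  induction t generalizing i acc with
  | nil => simp [PySem.List.enumerate_nil, ctRef]
  | cons x xs ih =>
    rw [PySem.List.enumerate_cons]
    simp only [List.foldl_cons, ctRef]
    split <;> rw [ih] <;> simp

theorem ctMerge_eq_ctRef (i : Int) (a b : List String)
    (ha : a.Pairwise (· ≤ ·)) (hb : b.Pairwise (· ≤ ·)) :
    ctMerge i a b = ctRef i b a := by
  induction i, a, b using ctMerge.induct with
  | case1 i b => simp [ctMerge, ctRef]
  | case2 i x xs => simp [ctMerge, ctRef_nil]
  | case3 i x xs y ys hxy ih =>
    have hxy' : x = y := by simpa using hxy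
    rw [ctMerge]
    simp only [hxy, if_pos]
    rw [ih (List.Pairwise.of_cons ha) hb, ctRef]
    simp [hxy']
  | case4 i x xs y ys hxy hlt ih =>
    rw [ctMerge]
    simp only [hxy, hlt, if_neg, if_pos, Bool.false_eq_true, not_false_eq_true]
    rw [ih (List.Pairwise.of_cons ha) hb, ctRef]
    have hnx : (y :: ys).contains x = false := by
      simp only [List.contains_eq_mem, decide_eq_false_iff_not]
      intro hmem
      rcases List.mem_cons.mp hmem with h | h
      · exact absurd h (by simpa using hxy)
      · have hyz : y ≤ x := (List.pairwise_cons.mp hb).1 x h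
        exact absurd hlt (not_lt.mpr hyz)
    rw [hnx]
    simp only [Bool.false_eq_true, if_neg, not_false_eq_true]
  | case5 i x xs y ys hxy hlt ih =>
    rw [ctMerge]
    simp only [hxy, hlt, if_neg, Bool.false_eq_true, not_false_eq_true]
    rw [ih ha (List.Pairwise.of_cons hb)]
    rw [ctRef_cons_irrel]
    intro z hz hzy
    have hne : x ≠ y := by simpa using hxy
    have hyx : y < x := lt_of_le_of_ne (not_lt.mp hlt) (Ne.symm hne)
    have hxz : x ≤ z := by
      rcases List.mem_cons.mp hz with h | h
      · exact le_of_eq h.symm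
      · exact (List.pairwise_cons.mp ha).1 z h
    have hyz : y < z := lt_of_lt_of_le hyx hxz
    rw [hzy] at hyz
    exact lt_irrefl _ hyz


-- ===== VERDICT (by name: the statement is the Claim_ definition above) =====
theorem check_tags_in_list_spec : Claim_equal_check_tags_in_list := by
  intro tag_list part_of_tag_list _
  unfold Spec_check_tags_in_list check_tags_in_list check_tags_in_list_alt
  rw [foldA_eq_ctRef]
  rw [ctMerge_eq_ctRef 0 _ _ (PySem.List.sorted_pairwise tag_list (fun x => x))
        (PySem.List.sorted_pairwise part_of_tag_list (fun x => x))]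
  simp
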